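-- pv_equiv track=rewrite | github.com/brianfields/deeplearn | backend/src/modules/content_creation/service.py | _create_source_material_from_concept
-- ===== SOURCE A (Python) =====
-- def _create_source_material_from_concept(
--
--     topic_title: str,
--     core_concept: str,
--     learning_objectives: list[str] | None = None,
--     key_aspects: list[str] | None = None,
--     common_misconceptions: list[str] | None = None,
--     previous_topics: list[str] | None = None,
--     avoid_overlap_with: list[str] | None = None,
-- ) -> str:
--     """Create structured source material from concept information for the MCQ service."""
--     material_parts = [f"# {topic_title}", f"## Core Concept: {core_concept}", ""]
--
--     if learning_objectives:
--         material_parts.extend(["## Learning Objectives", *[f"- {obj}" for obj in learning_objectives], ""])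
--
--     if key_aspects:
--         material_parts.extend(["## Key Aspects", *[f"- {aspect}" for aspect in key_aspects], ""])
--
--     if common_misconceptions:
--         material_parts.extend(
--             ["## Common Misconceptions", *[f"- {misconception}" for misconception in common_misconceptions], ""]
--         )
--
--     if previous_topics:
--         material_parts.extend(
--             ["## Previous Topics (for context)", *[f"- {topic}" for topic in previous_topics], ""]
--         )
--
--     if avoid_overlap_with:
--         material_parts.extend(
--             ["## Topics to Avoid Overlapping With", *[f"- {topic}" for topic in avoid_overlap_with], ""]
--         )
--
--     return "\n".join(material_parts)
-- ===== SOURCE B (Python) =====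
-- def _create_source_material_from_concept(
--     topic_title: str,
--     core_concept: str,
--     learning_objectives: list[str] | None = None,
--     key_aspects: list[str] | None = None,
--     common_misconceptions: list[str] | None = None,
--     previous_topics: list[str] | None = None,
--     avoid_overlap_with: list[str] | None = None,
-- ) -> str:
--     """Builds the result string directly by concatenation: a recursive renderer
--     emits each non-empty section as one chunk; no list of lines, no final join."""
--
--     def render(sections):
--         if not sections:
--             return ""
--         header, items = sections[0]
--         block = ""
--         if items:
--             block = "\n" + header + "".join("\n- " + x for x in items) + "\n"
--         return block + render(sections[1:])
--
--     return (
--         "# " + topic_title + "\n## Core Concept: " + core_concept + "\n"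
--         + render([
--             ("## Learning Objectives", learning_objectives),
--             ("## Key Aspects", key_aspects),
--             ("## Common Misconceptions", common_misconceptions),
--             ("## Previous Topics (for context)", previous_topics),
--             ("## Topics to Avoid Overlapping With", avoid_overlap_with),
--         ])
--     )
-- ===== Notes on version B (the rewrite author's own statement) =====
-- stated objective: alternative
-- what changed: A accumulates a flat list of lines and '\n'.join()s it at the end; B never builds a line list: it concatenates the output string directly, with a recursive renderer that turns each non-empty (header, items) section into one string chunk.
import Mathlib
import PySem

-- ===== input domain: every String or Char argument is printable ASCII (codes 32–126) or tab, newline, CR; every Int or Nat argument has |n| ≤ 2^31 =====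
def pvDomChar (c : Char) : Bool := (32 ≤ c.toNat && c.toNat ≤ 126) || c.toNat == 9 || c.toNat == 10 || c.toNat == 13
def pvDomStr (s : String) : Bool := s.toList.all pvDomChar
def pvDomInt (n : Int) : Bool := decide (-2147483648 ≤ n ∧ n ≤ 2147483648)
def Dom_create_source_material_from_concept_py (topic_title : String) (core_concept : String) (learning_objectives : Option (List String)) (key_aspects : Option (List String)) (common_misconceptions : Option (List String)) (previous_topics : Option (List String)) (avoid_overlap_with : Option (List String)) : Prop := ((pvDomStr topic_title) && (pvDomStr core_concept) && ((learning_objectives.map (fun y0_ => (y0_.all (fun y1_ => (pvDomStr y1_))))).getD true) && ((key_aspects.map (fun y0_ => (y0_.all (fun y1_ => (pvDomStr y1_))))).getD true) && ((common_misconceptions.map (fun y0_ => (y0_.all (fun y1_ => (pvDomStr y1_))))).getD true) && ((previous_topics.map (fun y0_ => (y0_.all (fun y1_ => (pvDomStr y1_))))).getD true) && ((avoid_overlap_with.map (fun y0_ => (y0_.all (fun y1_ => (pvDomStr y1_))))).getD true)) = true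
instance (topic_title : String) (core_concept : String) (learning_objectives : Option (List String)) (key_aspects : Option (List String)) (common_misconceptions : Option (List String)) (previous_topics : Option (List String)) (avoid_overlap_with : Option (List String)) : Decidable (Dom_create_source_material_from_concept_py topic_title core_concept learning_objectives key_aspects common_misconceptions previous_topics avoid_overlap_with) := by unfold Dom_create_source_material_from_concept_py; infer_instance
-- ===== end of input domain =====

-- ===== PORT A =====
-- B differs from A by building the output string directly by concatenation with a recursive
-- section renderer instead of accumulating a list of lines and joining it (objective: alternative).
-- Python truthiness of a `list | None` argument: truthy iff it is a non-empty list.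
def pyTruthyList (o : Option (List String)) : Bool :=
  match o with
  | none => false
  | some l => !l.isEmpty

def create_source_material_from_concept_py (topic_title : String) (core_concept : String) (learning_objectives : Option (List String)) (key_aspects : Option (List String)) (common_misconceptions : Option (List String)) (previous_topics : Option (List String)) (avoid_overlap_with : Option (List String)) : String :=
  let material_parts : List String := ["# " ++ topic_title, "## Core Concept: " ++ core_concept, ""]
  let material_parts :=
    if pyTruthyList learning_objectives then
      material_parts ++ ["## Learning Objectives"] ++ (learning_objectives.getD []).map (fun obj => "- " ++ obj) ++ [""]
    else material_parts
  let material_parts :=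
    if pyTruthyList key_aspects then
      material_parts ++ ["## Key Aspects"] ++ (key_aspects.getD []).map (fun aspect => "- " ++ aspect) ++ [""]
    else material_parts
  let material_parts :=
    if pyTruthyList common_misconceptions then
      material_parts ++ ["## Common Misconceptions"] ++ (common_misconceptions.getD []).map (fun m => "- " ++ m) ++ [""]
    else material_parts
  let material_parts :=
    if pyTruthyList previous_topics then
      material_parts ++ ["## Previous Topics (for context)"] ++ (previous_topics.getD []).map (fun t => "- " ++ t) ++ [""]
    else material_parts
  let material_parts :=
    if pyTruthyList avoid_overlap_with then
      material_parts ++ ["## Topics to Avoid Overlapping With"] ++ (avoid_overlap_with.getD []).map (fun t => "- " ++ t) ++ [""]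
    else material_parts
  PySem.Str.join "\n" material_parts

-- ===== PORT B =====
-- Source B's inner `render`: recursion over the (header, items) section list, emitting each truthy
-- section as one directly concatenated chunk ("".join ported as PySem.Str.join "").
def pvRender : List (String × Option (List String)) → String
  | [] => ""
  | (header, items) :: rest =>
      (if pyTruthyList items then
        "\n" ++ header ++ PySem.Str.join "" ((items.getD []).map (fun x => "\n- " ++ x)) ++ "\n"
      else "") ++ pvRender rest

def create_source_material_from_concept_py_alt (topic_title : String) (core_concept : String) (learning_objectives : Option (List String)) (key_aspects : Option (List String)) (common_misconceptions : Option (List String)) (previous_topics : Option (List String)) (avoid_overlap_with : Option (List String)) : String :=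
  "# " ++ topic_title ++ "\n## Core Concept: " ++ core_concept ++ "\n" ++
    pvRender
      [("## Learning Objectives", learning_objectives),
       ("## Key Aspects", key_aspects),
       ("## Common Misconceptions", common_misconceptions),
       ("## Previous Topics (for context)", previous_topics),
       ("## Topics to Avoid Overlapping With", avoid_overlap_with)]

-- ===== PRECONDITION & SPEC =====
def Spec_create_source_material_from_concept_py (topic_title : String) (core_concept : String) (learning_objectives : Option (List String)) (key_aspects : Option (List String)) (common_misconceptions : Option (List String)) (previous_topics : Option (List String)) (avoid_overlap_with : Option (List String)) (out : String) : Prop := out = create_source_material_from_concept_py_alt topic_title core_concept learning_objectives key_aspects common_misconceptions previous_topics avoid_overlap_with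
instance (topic_title : String) (core_concept : String) (learning_objectives : Option (List String)) (key_aspects : Option (List String)) (common_misconceptions : Option (List String)) (previous_topics : Option (List String)) (avoid_overlap_with : Option (List String)) (out : String) : Decidable (Spec_create_source_material_from_concept_py topic_title core_concept learning_objectives key_aspects common_misconceptions previous_topics avoid_overlap_with out) := by unfold Spec_create_source_material_from_concept_py; infer_instance

-- ===== CLAIM (what is proved, stated in full; the proofs are below) =====
def Claim_equal_create_source_material_from_concept_py : Prop := ∀ (topic_title : String) (core_concept : String) (learning_objectives : Option (List String)) (key_aspects : Option (List String)) (common_misconceptions : Option (List String)) (previous_topics : Option (List String)) (avoid_overlap_with : Option (List String)), Dom_create_source_material_from_concept_py topic_title core_concept learning_objectives key_aspects common_misconceptions previous_topics avoid_overlap_with → Spec_create_source_material_from_concept_py topic_title core_concept learning_objectives key_aspects common_misconceptions previous_topics avoid_overlap_with (create_source_material_from_concept_py topic_title core_concept learning_objectives key_aspects common_misconceptions previous_topics avoid_overlap_with)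

-- ===== LEMMAS AND PROOFS =====
-- Char-level algebra of '\n'-intercalation, relating A's join-of-lines to B's direct chunks.
theorem ic_cons_cons (sep a b : List Char) (l : List (List Char)) :
    sep.intercalate (a :: b :: l) = a ++ sep ++ sep.intercalate (b :: l) := by
  simp [List.intercalate, List.intersperse]

theorem ic_single (sep a : List Char) : sep.intercalate [a] = a := by
  simp [List.intercalate]

theorem ic_nil_sep (l : List (List Char)) : List.intercalate ([] : List Char) l = l.flatten := by
  induction l with
  | nil => simp [List.intercalate]
  | cons x xs ih =>
    cases xs with
    | nil => simp [ic_single]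
    | cons y ys => simp_all [ic_cons_cons]

theorem ic_map_block {α : Type} (sep h t : List Char) (g : α → List Char) (its : List α)
    (ts : List (List Char)) :
    sep.intercalate (h :: (its.map g ++ (t :: ts))) =
    h ++ ((its.map (fun x => sep ++ g x)).flatten ++ (sep ++ sep.intercalate (t :: ts))) := by
  induction its generalizing h with
  | nil => simp [ic_cons_cons]
  | cons x xs ih => simp [ic_cons_cons, ih, List.append_assoc]

-- ===== VERDICT (by name: the statement is the Claim_ definition above) =====
set_option maxHeartbeats 4000000 in
theorem create_source_material_from_concept_py_spec : Claim_equal_create_source_material_from_concept_py := by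
  intro tt cc lo ka cm pt ao _
  unfold Spec_create_source_material_from_concept_py
  unfold create_source_material_from_concept_py create_source_material_from_concept_py_alt
  refine String.toList_inj.mp ?_
  cases lo <;> cases ka <;> cases cm <;> cases pt <;> cases ao <;>
    simp [pyTruthyList, pvRender, PySem.Str.join, PySem.Chars.join, String.toList_append,
      String.toList_ofList] <;>
    (try split_ifs) <;>
    simp_all [ic_cons_cons, ic_single, ic_nil_sep, ic_map_block, List.append_assoc,
      List.map_map, Function.comp_def, String.toList_append, String.toList_ofList]
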